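-- pv_equiv track=rewrite | github.com/cschan279/canbus_comm | zhcx/nxr_comm/utils/nxr_cmd.py | ext_id
-- ===== SOURCE A (Python) =====
-- def assert_var(var, typ, len_limit):
--     wn = "Wrong type: {} {}".format(type(var), str(typ))
--     assert isinstance(var, typ), wn
--     wn = "Out of range: 0<{}<{}".format(var, 2**len_limit)
--     assert var >= 0 and var < 2**len_limit, wn
--     return
--
-- def ext_id(ptp=0x0, dst=0xff, src=0xf0, grp=0x0):
--     val_len = (1,8,8,3)
--     var = (ptp, dst, src, grp)
--     res = 0x060
--     for i in range(4):
--         assert_var(var[i], int, val_len[i])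
--         res = res << val_len[i]
--         res += var[i]
--     return res
-- ===== SOURCE B (Python) =====
-- def assert_var(var, typ, len_limit):
--     wn = "Wrong type: {} {}".format(type(var), str(typ))
--     assert isinstance(var, typ), wn
--     wn = "Out of range: 0<{}<{}".format(var, 2**len_limit)
--     assert var >= 0 and var < 2**len_limit, wn
--     return
--
-- def to_bits(v, n):
--     # fixed-width big-endian base-2 digit list of v, via repeated divmod
--     out = []
--     for _ in range(n):
--         v, b = divmod(v, 2)
--         out.append(b)
--     out.reverse()
--     return out
--
-- def ext_id(ptp=0x0, dst=0xff, src=0xf0, grp=0x0):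
--     # decompose the prefix and each field into binary digits, concatenate,
--     # then reassemble the whole id with a single Horner pass
--     digits = to_bits(0x060, 7)
--     for v, n in ((ptp, 1), (dst, 8), (src, 8), (grp, 3)):
--         assert_var(v, int, n)
--         digits += to_bits(v, n)
--     res = 0
--     for d in digits:
--         res = 2 * res + d
--     return res
-- ===== Notes on version B (the rewrite author's own statement) =====
-- stated objective: alternative
-- what changed: Instead of A's shift-and-accumulate over the fields, B decomposes the prefix and every field into fixed-width base-2 digit lists via repeated divmod, concatenates them, and rebuilds the id with a single Horner fold over the digit list.
import Mathlib
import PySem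

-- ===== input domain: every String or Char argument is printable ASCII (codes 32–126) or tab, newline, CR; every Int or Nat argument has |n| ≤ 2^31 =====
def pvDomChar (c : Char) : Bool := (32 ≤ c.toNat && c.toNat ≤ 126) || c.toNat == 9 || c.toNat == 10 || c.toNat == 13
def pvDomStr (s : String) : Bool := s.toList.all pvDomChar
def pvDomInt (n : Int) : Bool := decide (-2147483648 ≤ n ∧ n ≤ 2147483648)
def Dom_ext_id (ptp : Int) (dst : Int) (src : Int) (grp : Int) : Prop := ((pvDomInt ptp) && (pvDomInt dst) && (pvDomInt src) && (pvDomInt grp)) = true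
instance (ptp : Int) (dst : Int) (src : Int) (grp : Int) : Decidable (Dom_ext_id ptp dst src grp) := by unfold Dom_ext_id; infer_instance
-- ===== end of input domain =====

-- B replaces A's shift-and-accumulate with base-2 digit decomposition of the prefix and
-- fields (repeated divmod) followed by one Horner fold over the concatenated digit list
-- (objective: alternative). Return-value equivalence; both raise AssertionError outside Pre_.

-- ===== PORT A =====
-- A's loop `for i in range(4): res = res << val_len[i]; res += var[i]` over the
-- zipped (val_len, var) tuples; `res << n` on a nonnegative Int is res * 2^n (exact here).
def ext_id (ptp : Int) (dst : Int) (src : Int) (grp : Int) : Int :=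
  let pairs : List (Nat × Int) := [(1, ptp), (8, dst), (8, src), (3, grp)]
  pairs.foldl (fun res p => res * 2 ^ p.1 + p.2) 0x060

-- ===== PORT B =====
-- Source B's to_bits: `for _ in range(n): v, b = divmod(v, 2); out.append(b)` then reverse;
-- divmod(v, 2) is (PySem.Int.floordiv v 2, PySem.Int.mod v 2) exactly.
def toBitsGo (v : Int) : Nat → List Int → List Int
  | 0, out => out
  | k + 1, out => toBitsGo (PySem.Int.floordiv v 2) k (out ++ [PySem.Int.mod v 2])

def toBits (v : Int) (n : Nat) : List Int := (toBitsGo v n []).reverse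

-- Source B's ext_id: digit-list concatenation over the (value, width) tuples, then Horner fold.
def ext_id_alt (ptp : Int) (dst : Int) (src : Int) (grp : Int) : Int :=
  let fields : List (Int × Nat) := [(ptp, 1), (dst, 8), (src, 8), (grp, 3)]
  let digits := fields.foldl (fun ds p => ds ++ toBits p.1 p.2) (toBits 0x060 7)
  digits.foldl (fun res d => 2 * res + d) 0

-- ===== PRECONDITION & SPEC =====
-- Pre_ excludes exactly the inputs on which A's assert_var raises AssertionError
-- (a field negative or ≥ 2^width); B raises there too.
def Pre_ext_id (ptp : Int) (dst : Int) (src : Int) (grp : Int) : Prop :=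
  0 ≤ ptp ∧ ptp < 2 ∧ 0 ≤ dst ∧ dst < 256 ∧ 0 ≤ src ∧ src < 256 ∧ 0 ≤ grp ∧ grp < 8
instance (ptp : Int) (dst : Int) (src : Int) (grp : Int) : Decidable (Pre_ext_id ptp dst src grp) := by unfold Pre_ext_id; infer_instance
def pvWitness_ext_id : Int × Int × Int × Int := (1, 255, 240, 3)

def Spec_ext_id (ptp : Int) (dst : Int) (src : Int) (grp : Int) (out : Int) : Prop := out = ext_id_alt ptp dst src grp
instance (ptp : Int) (dst : Int) (src : Int) (grp : Int) (out : Int) : Decidable (Spec_ext_id ptp dst src grp out) := by unfold Spec_ext_id; infer_instance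

-- ===== CLAIM (what is proved, stated in full; the proofs are below) =====
def Claim_equal_ext_id : Prop := ∀ (ptp : Int) (dst : Int) (src : Int) (grp : Int), Dom_ext_id ptp dst src grp → Pre_ext_id ptp dst src grp → Spec_ext_id ptp dst src grp (ext_id ptp dst src grp)

-- ===== LEMMAS AND PROOFS =====

-- the accumulator of toBitsGo is only ever appended to
theorem toBitsGo_acc (v : Int) (n : Nat) (out : List Int) :
    toBitsGo v n out = out ++ toBitsGo v n [] := by
  induction n generalizing v out with
  | zero => simp [toBitsGo]
  | succ k ih =>
      rw [toBitsGo, toBitsGo, ih (PySem.Int.floordiv v 2) (out ++ _),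
        ih (PySem.Int.floordiv v 2) ([] ++ _)]
      simp

theorem toBits_succ (v : Int) (n : Nat) :
    toBits v (n + 1) = toBits (PySem.Int.floordiv v 2) n ++ [PySem.Int.mod v 2] := by
  rw [toBits, toBits, toBitsGo, toBitsGo_acc]
  simp

-- Horner fold over a fixed-width digit list recovers a*2^n + v when 0 ≤ v < 2^n
theorem horner_toBits (n : Nat) (v a : Int) (h0 : 0 ≤ v) (h1 : v < 2 ^ n) :
    (toBits v n).foldl (fun res d => 2 * res + d) a = a * 2 ^ n + v := by
  induction n generalizing v a with
  | zero =>
      have : v = 0 := by omega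
      simp [toBits, toBitsGo, this]
  | succ k ih =>
      have hfd : PySem.Int.floordiv v 2 = v / 2 :=
        PySem.Int.floordiv_eq_ediv_of_pos (by omega)
      have hmd : PySem.Int.mod v 2 = v % 2 :=
        PySem.Int.mod_eq_emod_of_pos (by omega)
      have hpow : (2 : Int) ^ (k + 1) = 2 ^ k * 2 := by ring
      rw [toBits_succ, List.foldl_append, ih (PySem.Int.floordiv v 2) a
        (by rw [hfd]; omega) (by rw [hfd]; rw [hpow] at h1; omega)]
      simp only [List.foldl]
      rw [hfd, hmd]
      have := Int.mul_ediv_add_emod v 2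
      ring_nf
      omega

-- ===== VERDICT (by name: the statement is the Claim_ definition above) =====
theorem ext_id_spec : Claim_equal_ext_id := by
  intro ptp dst src grp _ hp
  obtain ⟨h1, h2, h3, h4, h5, h6, h7, h8⟩ := hp
  unfold Spec_ext_id ext_id ext_id_alt
  simp only [List.foldl, List.foldl_append]
  rw [horner_toBits 7 0x060 0 (by norm_num) (by norm_num),
    horner_toBits 1 ptp _ h1 (by omega),
    horner_toBits 8 dst _ h3 (by omega),
    horner_toBits 8 src _ h5 (by omega),
    horner_toBits 3 grp _ h7 (by omega)]
  ring
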